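-- pv_equiv track=rewrite | github.com/EcoGamer18/Advent_of_Code2020 | Day_10/day_10.py | resolve1
-- ===== SOURCE A (Python) =====
-- def resolve1(lista):
--     j1 = 1 if lista[0] == 1 else 3
--     j3 = 1
--     for i in range(len(lista) - 1):
--         if lista[i + 1] - lista[i] == 1:
--             j1 += 1
--         elif lista[i + 1] - lista[i] == 3:
--             j3 += 1
--     return j1 * j3
-- ===== SOURCE B (Python) =====
-- def _count13(lista, lo, hi):
--     # counts of adjacent differences equal to 1 and to 3 within lista[lo:hi],
--     # by divide and conquer: split at the midpoint, recurse, add the junction pair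
--     if hi - lo < 2:
--         return (0, 0)
--     mid = (lo + hi) // 2
--     a1, a3 = _count13(lista, lo, mid)
--     b1, b3 = _count13(lista, mid, hi)
--     d = lista[mid] - lista[mid - 1]
--     return (a1 + b1 + (d == 1), a3 + b3 + (d == 3))
--
-- def resolve1(lista):
--     c1, c3 = _count13(lista, 0, len(lista))
--     j1 = c1 + (1 if lista[0] == 1 else 3)
--     j3 = c3 + 1
--     return j1 * j3
-- ===== Notes on version B (the rewrite author's own statement) =====
-- stated objective: alternative
-- what changed: B counts the 1- and 3-differences by divide and conquer on index ranges (split at the midpoint, recurse on both halves, add the junction pair), instead of A's single linear index loop with branching accumulators.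
import Mathlib
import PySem

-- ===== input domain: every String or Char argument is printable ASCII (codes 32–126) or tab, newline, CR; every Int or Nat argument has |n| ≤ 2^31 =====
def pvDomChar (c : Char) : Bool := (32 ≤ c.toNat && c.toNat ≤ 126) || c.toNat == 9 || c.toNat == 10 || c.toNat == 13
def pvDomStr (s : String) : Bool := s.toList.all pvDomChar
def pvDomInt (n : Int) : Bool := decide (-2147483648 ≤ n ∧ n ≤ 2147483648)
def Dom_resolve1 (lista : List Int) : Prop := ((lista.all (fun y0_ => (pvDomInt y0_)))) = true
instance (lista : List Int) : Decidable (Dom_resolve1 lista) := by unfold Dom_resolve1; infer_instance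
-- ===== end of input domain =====

-- B counts the 1- and 3-differences by divide and conquer on index ranges instead of A's linear loop (alternative algorithm; same cost).

-- ===== PORT A =====
def resolve1 (lista : List Int) : Int :=
  match PySem.List.pyGet? lista 0 with
  | none => 0  -- IndexError on the empty list; excluded by Pre_resolve1
  | some h =>
    let j1 : Int := if h == 1 then 1 else 3
    let p := (PySem.List.pyRange 0 ((lista.length : Int) - 1) 1).foldl
      (fun (acc : Int × Int) i =>
        if PySem.List.pyGetD lista (i + 1) 0 - PySem.List.pyGetD lista i 0 = 1 then
          (acc.1 + 1, acc.2)
        else if PySem.List.pyGetD lista (i + 1) 0 - PySem.List.pyGetD lista i 0 = 3 then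
          (acc.1, acc.2 + 1)
        else acc) (j1, 1)
    p.1 * p.2

-- ===== PORT B =====
-- divide-and-conquer helper: counts of adjacent diffs equal to 1 and 3 within lista[lo:hi]
def count13 (lista : List Int) (lo hi : Int) : Int × Int :=
  if hi - lo < 2 then (0, 0)
  else
    let mid := PySem.Int.floordiv (lo + hi) 2
    let a := count13 lista lo mid
    let b := count13 lista mid hi
    let d := PySem.List.pyGetD lista mid 0 - PySem.List.pyGetD lista (mid - 1) 0
    (a.1 + b.1 + (if d = 1 then 1 else 0), a.2 + b.2 + (if d = 3 then 1 else 0))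
termination_by (hi - lo).toNat
decreasing_by
  · have h1 : lo + 1 ≤ PySem.Int.floordiv (lo + hi) 2 :=
      (PySem.Int.le_floordiv_iff_mul_le (by omega)).mpr (by omega)
    have h2 : PySem.Int.floordiv (lo + hi) 2 < hi :=
      (PySem.Int.floordiv_lt_iff_lt_mul (by omega)).mpr (by omega)
    omega
  · have h1 : lo + 1 ≤ PySem.Int.floordiv (lo + hi) 2 :=
      (PySem.Int.le_floordiv_iff_mul_le (by omega)).mpr (by omega)
    have h2 : PySem.Int.floordiv (lo + hi) 2 < hi :=
      (PySem.Int.floordiv_lt_iff_lt_mul (by omega)).mpr (by omega)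
    omega

def resolve1_alt (lista : List Int) : Int :=
  let c := count13 lista 0 (lista.length : Int)
  match PySem.List.pyGet? lista 0 with
  | none => 0  -- IndexError on the empty list; excluded by Pre_resolve1
  | some h =>
    let j1 : Int := c.1 + (if h == 1 then 1 else 3)
    let j3 : Int := c.2 + 1
    j1 * j3

-- ===== PRECONDITION & SPEC =====
-- Pre_ excludes only the empty list, on which both A and B raise IndexError when reading the first element.
def Pre_resolve1 (lista : List Int) : Prop := lista ≠ []
instance (lista : List Int) : Decidable (Pre_resolve1 lista) := by unfold Pre_resolve1; infer_instance
def pvWitness_resolve1 : List Int := [1, 2, 3, 6]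
def Spec_resolve1 (lista : List Int) (out : Int) : Prop := out = resolve1_alt lista
instance (lista : List Int) (out : Int) : Decidable (Spec_resolve1 lista out) := by unfold Spec_resolve1; infer_instance

-- ===== CLAIM (what is proved, stated in full; the proofs are below) =====
def Claim_equal_resolve1 : Prop := ∀ (lista : List Int), Dom_resolve1 lista → Pre_resolve1 lista → Spec_resolve1 lista (resolve1 lista)

-- ===== LEMMAS AND PROOFS =====

-- number of indices i in [lo, hi-1) whose adjacent difference equals d
def cnt (lista : List Int) (d lo hi : Int) : Int :=
  (((PySem.List.pyRange lo (hi - 1) 1).countP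
    (fun i => PySem.List.pyGetD lista (i + 1) 0 - PySem.List.pyGetD lista i 0 == d) : Nat) : Int)

theorem cnt_empty (lista : List Int) (d lo hi : Int) (h : hi - lo < 2) :
    cnt lista d lo hi = 0 := by
  unfold cnt
  rw [PySem.List.pyRange_one_eq_nil (by omega)]
  simp

theorem cnt_split (lista : List Int) (d lo mid hi : Int)
    (h1 : lo + 1 ≤ mid) (h2 : mid < hi) :
    cnt lista d lo hi = cnt lista d lo mid
      + (if PySem.List.pyGetD lista mid 0 - PySem.List.pyGetD lista (mid - 1) 0 = d then 1 else 0)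
      + cnt lista d mid hi := by
  unfold cnt
  rw [PySem.List.pyRange_one_append lo (mid - 1) (hi - 1) (by omega) (by omega),
      PySem.List.pyRange_one_cons (by omega : mid - 1 < hi - 1)]
  have : mid - 1 + 1 = mid := by omega
  simp only [List.countP_append, List.countP_cons, beq_iff_eq]
  rw [this]
  split_ifs with hd <;> push_cast <;> ring

theorem count13_eq (lista : List Int) :
    ∀ (n : Nat) (lo hi : Int), (hi - lo).toNat ≤ n →
      count13 lista lo hi = (cnt lista 1 lo hi, cnt lista 3 lo hi) := by
  intro n
  induction n with
  | zero =>
    intro lo hi h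
    rw [count13, if_pos (by omega), cnt_empty _ _ _ _ (by omega), cnt_empty _ _ _ _ (by omega)]
  | succ n ih =>
    intro lo hi h
    rw [count13]
    by_cases hlt : hi - lo < 2
    · rw [if_pos hlt, cnt_empty _ _ _ _ hlt, cnt_empty _ _ _ _ hlt]
    · rw [if_neg hlt]
      have h1 : lo + 1 ≤ PySem.Int.floordiv (lo + hi) 2 :=
        (PySem.Int.le_floordiv_iff_mul_le (by omega)).mpr (by omega)
      have h2 : PySem.Int.floordiv (lo + hi) 2 < hi :=
        (PySem.Int.floordiv_lt_iff_lt_mul (by omega)).mpr (by omega)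
      dsimp only
      rw [ih lo (PySem.Int.floordiv (lo + hi) 2) (by omega),
          ih (PySem.Int.floordiv (lo + hi) 2) hi (by omega),
          cnt_split lista 1 lo (PySem.Int.floordiv (lo + hi) 2) hi h1 h2,
          cnt_split lista 3 lo (PySem.Int.floordiv (lo + hi) 2) hi h1 h2]
      simp only [Prod.mk.injEq]
      constructor <;> dsimp only <;> ring

-- A's branching accumulator loop counts the 1- and 3-differences over any index list.
theorem foldl_count_13 (lista : List Int) (l : List Int) (a b : Int) :
    l.foldl (fun (acc : Int × Int) i =>
      if PySem.List.pyGetD lista (i + 1) 0 - PySem.List.pyGetD lista i 0 = 1 then (acc.1 + 1, acc.2)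
      else if PySem.List.pyGetD lista (i + 1) 0 - PySem.List.pyGetD lista i 0 = 3 then (acc.1, acc.2 + 1)
      else acc) (a, b)
    = (a + ((l.countP (fun i => PySem.List.pyGetD lista (i + 1) 0 - PySem.List.pyGetD lista i 0 == 1) : Nat) : Int),
       b + ((l.countP (fun i => PySem.List.pyGetD lista (i + 1) 0 - PySem.List.pyGetD lista i 0 == 3) : Nat) : Int)) := by
  induction l generalizing a b with
  | nil => simp
  | cons x t ih =>
    simp only [List.foldl_cons, List.countP_cons, beq_iff_eq]
    split_ifs with h1 h3 <;> rw [ih] <;> simp only [Prod.mk.injEq] <;> push_cast <;>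
      constructor <;> omega

-- ===== VERDICT (by name: the statement is the Claim_ definition above) =====
theorem resolve1_spec : Claim_equal_resolve1 := by
  intro lista _ hpre
  unfold Spec_resolve1 resolve1 resolve1_alt
  obtain ⟨x, t, rfl⟩ := List.exists_cons_of_ne_nil hpre
  have hget : PySem.List.pyGet? (x :: t) 0 = some x := by
    simp [PySem.List.pyGet?, PySem.List.pyIdx?]
  rw [hget]
  dsimp only
  rw [count13_eq (x :: t) ((((x :: t).length : Int) - 0).toNat) 0 ((x :: t).length : Int) le_rfl]
  rw [foldl_count_13]
  unfold cnt
  dsimp only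
  ring
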